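-- pv_equiv track=rewrite | github.com/eladaniliuc/module_0 | main.py | game_core_v1
-- ===== SOURCE A (Python) =====
-- def game_core_v1(number):
--     '''Сначала устанавливаем любое random число, а потом уменьшаем или увеличиваем его в зависимости от того, больше оно или меньше нужного.
--        Функция принимает загаданное число и возвращает число попыток'''
--     count = 1
--     predict = 50 #первое загаданое число всегда равно 50
--     while number != predict:
--         count+=1
--         if number > predict:
--             for i in range(6):
--                 if predict+i*10 > number: #подсчитываем десятки, чтобы превысить number
--                     break
--             predict += (i)*10   #суммируем десятки
--             if number < predict:
--                 predict -= 5    #вычитаем 5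
--         elif number < predict:
--             for i in range(6):
--                 if predict-i*10 < number: #подсчитываем десятки, для вычитания
--                     break
--             predict -= (i-1)*10  #вычитаем десятки
--             if number < predict:
--                 predict -= 1 #вычитаем единицу
--     return(count) # выход из цикла, если угадали
-- ===== SOURCE B (Python) =====
-- def game_core_v1(number):
--     count = 1
--     predict = 50
--     # fast-forward the far phase in O(1): while the gap is >= 50 the original
--     # strategy moves predict by a fixed +50 (above) or -41 (below) per attempt
--     if number - predict >= 50:
--         k = (number - predict) // 50
--         count += k
--         predict += 50 * k
--     elif predict - number >= 50:
--         k = (predict - number - 9) // 41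
--         count += k
--         predict -= 41 * k
--     while number != predict:
--         count += 1
--         if number > predict:
--             predict += ((number - predict) // 10 + 1) * 10
--             if number < predict:
--                 predict -= 5
--         else:
--             predict -= ((predict - number) // 10) * 10
--             if number < predict:
--                 predict -= 1
--     return count
-- ===== Notes on version B (the rewrite author's own statement) =====
-- stated objective: faster
-- what changed: The far phase, in which the original strategy moves predict by a fixed constant step per attempt (one step size above the target, another below), is collapsed into one closed-form jump, and the remaining near-phase inner range(6) scan is replaced by a division formula.
import Mathlib
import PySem

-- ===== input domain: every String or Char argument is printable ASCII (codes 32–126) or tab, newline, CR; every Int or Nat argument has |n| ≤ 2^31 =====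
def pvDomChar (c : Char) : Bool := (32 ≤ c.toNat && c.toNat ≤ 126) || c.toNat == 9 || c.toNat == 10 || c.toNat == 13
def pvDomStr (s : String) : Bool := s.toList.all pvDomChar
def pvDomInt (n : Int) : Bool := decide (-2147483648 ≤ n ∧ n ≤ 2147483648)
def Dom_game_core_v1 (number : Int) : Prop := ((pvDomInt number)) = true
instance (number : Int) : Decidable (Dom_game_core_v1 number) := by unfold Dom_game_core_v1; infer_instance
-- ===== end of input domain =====

-- B collapses the far phase of A's strategy, in which predict moves by a fixed constant
-- step per attempt, into one closed-form jump, and replaces the inner range(6) scan by a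
-- division formula; objective: faster (constantly many vs linearly many loop iterations).
-- Both while-loops are ported with a fuel parameter as a pure totality guard (proved sufficient below).
set_option maxHeartbeats 1000000


-- ===== PORT A =====
-- `for i in range(6): if predict+i*10 > number: break` — leftover i (5 if no break)
def gameForUp (predict number : Int) : Int :=
  if predict + 0 * 10 > number then 0
  else if predict + 1 * 10 > number then 1
  else if predict + 2 * 10 > number then 2
  else if predict + 3 * 10 > number then 3
  else if predict + 4 * 10 > number then 4
  else 5

-- `for i in range(6): if predict-i*10 < number: break` — leftover i (5 if no break)
def gameForDown (predict number : Int) : Int :=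
  if predict - 0 * 10 < number then 0
  else if predict - 1 * 10 < number then 1
  else if predict - 2 * 10 < number then 2
  else if predict - 3 * 10 < number then 3
  else if predict - 4 * 10 < number then 4
  else 5

-- the `while number != predict` loop; fuel is a totality guard only (never exhausted at the call below)
def game_core_v1_loop : Nat → Int → Int → Int → Int
  | 0, _, count, _ => count
  | fuel + 1, number, count, predict =>
    if number = predict then count
    else if number > predict then
      let i := gameForUp predict number
      let predict1 := predict + i * 10
      let predict2 := if number < predict1 then predict1 - 5 else predict1
      game_core_v1_loop fuel number (count + 1) predict2
    else
      let i := gameForDown predict number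
      let predict1 := predict - (i - 1) * 10
      let predict2 := if number < predict1 then predict1 - 1 else predict1
      game_core_v1_loop fuel number (count + 1) predict2

def game_core_v1 (number : Int) : Int :=
  game_core_v1_loop ((number - 50).natAbs + 64) number 1 50

-- ===== PORT B =====
-- tail loop of Source B (the while loop after the O(1) jump); Python `//` here always has
-- nonnegative operands, where Int's `/` agrees with it; fuel is a totality guard only
def game_core_v1_alt_loop : Nat → Int → Int → Int → Int
  | 0, _, count, _ => count
  | fuel + 1, number, count, predict =>
    if number = predict then count
    else if number > predict then
      let predict1 := predict + ((number - predict) / 10 + 1) * 10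
      let predict2 := if number < predict1 then predict1 - 5 else predict1
      game_core_v1_alt_loop fuel number (count + 1) predict2
    else
      let predict1 := predict - ((predict - number) / 10) * 10
      let predict2 := if number < predict1 then predict1 - 1 else predict1
      game_core_v1_alt_loop fuel number (count + 1) predict2

def game_core_v1_alt (number : Int) : Int :=
  if number - 50 ≥ 50 then
    let k := (number - 50) / 50
    game_core_v1_alt_loop 64 number (1 + k) (50 + 50 * k)
  else if 50 - number ≥ 50 then
    let k := (50 - number - 9) / 41
    game_core_v1_alt_loop 64 number (1 + k) (50 - 41 * k)
  else
    game_core_v1_alt_loop 64 number 1 50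

-- ===== PRECONDITION & SPEC =====
def Spec_game_core_v1 (number : Int) (out : Int) : Prop := out = game_core_v1_alt number
instance (number : Int) (out : Int) : Decidable (Spec_game_core_v1 number out) := by unfold Spec_game_core_v1; infer_instance

-- ===== CLAIM (what is proved, stated in full; the proofs are below) =====
def Claim_equal_game_core_v1 : Prop := ∀ (number : Int), Dom_game_core_v1 number → Spec_game_core_v1 number (game_core_v1 number)

-- ===== LEMMAS AND PROOFS =====

-- decreasing measure of the guessing loop's state (both loops terminate within it)
def pvMeasure (number predict : Int) : Nat :=
  let g := number - predict
  if g = 0 then 0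
  else if 0 < g then
    if g < 5 then (6 - g).toNat
    else if g < 50 then 7
    else g.toNat
  else
    if -g ≤ 9 then (-g).toNat
    else if -g < 50 then 9
    else (-g).toNat

theorem pvMeasure_cases (number predict : Int) :
    (number - predict = 0 ∧ pvMeasure number predict = 0)
  ∨ (0 < number - predict ∧ number - predict < 5 ∧ (pvMeasure number predict : Int) = 6 - (number - predict))
  ∨ (5 ≤ number - predict ∧ number - predict < 50 ∧ pvMeasure number predict = 7)
  ∨ (50 ≤ number - predict ∧ (pvMeasure number predict : Int) = number - predict)
  ∨ (-9 ≤ number - predict ∧ number - predict < 0 ∧ (pvMeasure number predict : Int) = predict - number)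
  ∨ (-50 < number - predict ∧ number - predict < -9 ∧ pvMeasure number predict = 9)
  ∨ (number - predict ≤ -50 ∧ (pvMeasure number predict : Int) = predict - number) := by
  simp only [pvMeasure]
  split_ifs <;> omega

theorem measure_dec_up (number predict p2 i : Int) (hgt : 0 < number - predict)
    (hi : (10 * (i - 1) ≤ number - predict ∧ number - predict < 10 * i) ∨ (50 ≤ number - predict ∧ i = 5))
    (hp : (number - predict < 10 * i ∧ number - p2 = number - predict - 10 * i + 5)
        ∨ (10 * i ≤ number - predict ∧ number - p2 = number - predict - 10 * i)) :
    pvMeasure number p2 < pvMeasure number predict := by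
  have c1 := pvMeasure_cases number predict
  have c2 := pvMeasure_cases number p2
  omega

theorem measure_dec_down (number predict p2 j : Int) (hlt : number - predict < 0)
    (hj : (10 * j ≤ predict - number ∧ predict - number < 10 * (j + 1)) ∨ (50 ≤ predict - number ∧ j = 4))
    (hp : (predict - number > 10 * j ∧ number - p2 = number - predict + 10 * j + 1)
        ∨ (predict - number = 10 * j ∧ number - p2 = 0)) :
    pvMeasure number p2 < pvMeasure number predict := by
  have c1 := pvMeasure_cases number predict
  have c2 := pvMeasure_cases number p2
  omega

-- closed characterization of the two scans
theorem gameForUp_eq (predict number : Int) (h : predict < number) :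
    gameForUp predict number
      = if number - predict < 50 then (number - predict) / 10 + 1 else 5 := by
  simp only [gameForUp]; split_ifs <;> omega

theorem gameForDown_eq (predict number : Int) (h : number < predict) :
    gameForDown predict number
      = if predict - number < 50 then (predict - number) / 10 + 1 else 5 := by
  simp only [gameForDown]; split_ifs <;> omega

-- In the near phase (|gap| < 50) A's scan equals B's division formula, the gap stays < 50,
-- and the measure bounds the remaining attempts, so with sufficient fuel the loops agree.
theorem loop_eq (n : Nat) : ∀ (fA fB : Nat) (number count predict : Int),
    pvMeasure number predict = n → n ≤ fA → n ≤ fB →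
    number - predict < 50 → predict - number < 50 →
    game_core_v1_loop fA number count predict = game_core_v1_alt_loop fB number count predict := by
  induction n using Nat.strong_induction_on with
  | _ n IH =>
    intro fA fB number count predict hm hA hB h1 h2
    by_cases he : number = predict
    · cases fA <;> cases fB <;> simp [game_core_v1_loop, game_core_v1_alt_loop, he]
    · have hn : 0 < n := by
        have c := pvMeasure_cases number predict
        omega
      obtain ⟨fA', rfl⟩ : ∃ f, fA = f + 1 := ⟨fA - 1, by omega⟩
      obtain ⟨fB', rfl⟩ : ∃ f, fB = f + 1 := ⟨fB - 1, by omega⟩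
      simp only [game_core_v1_loop, game_core_v1_alt_loop, if_neg he]
      by_cases hgt : number > predict
      · simp only [if_pos hgt]
        rw [gameForUp_eq predict number (by omega), if_pos h1]
        have hlt : pvMeasure number
            (if number < predict + ((number - predict) / 10 + 1) * 10
             then predict + ((number - predict) / 10 + 1) * 10 - 5
             else predict + ((number - predict) / 10 + 1) * 10) < n := by
          rw [← hm]
          split_ifs with hc
          · exact measure_dec_up number predict _ ((number - predict) / 10 + 1) (by omega)
              (Or.inl ⟨by omega, by omega⟩) (Or.inl ⟨by omega, by omega⟩)
          · exact measure_dec_up number predict _ ((number - predict) / 10 + 1) (by omega)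
              (Or.inl ⟨by omega, by omega⟩) (Or.inr ⟨by omega, by omega⟩)
        exact IH _ hlt _ _ _ _ _ rfl (by omega) (by omega)
          (by split_ifs <;> omega) (by split_ifs <;> omega)
      · simp only [if_neg hgt]
        rw [gameForDown_eq predict number (by omega), if_pos h2]
        have hj : ((predict - number) / 10 + 1 - 1) = (predict - number) / 10 := by omega
        rw [hj]
        have hlt : pvMeasure number
            (if number < predict - (predict - number) / 10 * 10
             then predict - (predict - number) / 10 * 10 - 1
             else predict - (predict - number) / 10 * 10) < n := by
          rw [← hm]
          split_ifs with hc
          · exact measure_dec_down number predict _ ((predict - number) / 10) (by omega)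
              (Or.inl ⟨by omega, by omega⟩) (Or.inl ⟨by omega, by omega⟩)
          · exact measure_dec_down number predict _ ((predict - number) / 10) (by omega)
              (Or.inl ⟨by omega, by omega⟩) (Or.inr ⟨by omega, by omega⟩)
        exact IH _ hlt _ _ _ _ _ rfl (by omega) (by omega)
          (by split_ifs <;> omega) (by split_ifs <;> omega)

-- One far step above: gap ≥ 50 ⇒ A's attempt is exactly predict += 50.
theorem jump_up (f : Nat) (number count predict : Int) (h : number - predict ≥ 50) :
    game_core_v1_loop (f + 1) number count predict
      = game_core_v1_loop f number (count + 1) (predict + 50) := by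
  simp only [game_core_v1_loop, if_neg (by omega : ¬ number = predict),
    if_pos (by omega : number > predict), gameForUp_eq predict number (by omega),
    if_neg (by omega : ¬ number - predict < 50)]
  rw [if_neg (by omega : ¬ number < predict + 5 * 10)]
  norm_num

theorem jump_up_iter (number : Int) (k : Nat) : ∀ (f : Nat) (count predict : Int),
    number - predict ≥ 50 * k →
    game_core_v1_loop (f + k) number count predict
      = game_core_v1_loop f number (count + k) (predict + 50 * k) := by
  induction k with
  | zero => intro f count predict _; simp
  | succ k ih =>
    intro f count predict h
    have h50 : number - predict ≥ 50 := by push_cast at h ⊢; omega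
    have hf : f + (k + 1) = (f + k) + 1 := by omega
    rw [hf, jump_up (f + k) number count predict h50,
      ih f (count + 1) (predict + 50) (by push_cast at h ⊢; omega)]
    congr 1 <;> push_cast <;> ring

-- One far step below: gap ≤ -50 ⇒ A's attempt is exactly predict -= 41.
theorem jump_down (f : Nat) (number count predict : Int) (h : predict - number ≥ 50) :
    game_core_v1_loop (f + 1) number count predict
      = game_core_v1_loop f number (count + 1) (predict - 41) := by
  simp only [game_core_v1_loop, if_neg (by omega : ¬ number = predict),
    if_neg (by omega : ¬ number > predict), gameForDown_eq predict number (by omega),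
    if_neg (by omega : ¬ predict - number < 50)]
  rw [if_pos (by omega : number < predict - (5 - 1) * 10)]
  have h41 : predict - (5 - 1) * 10 - 1 = predict - 41 := by ring
  rw [h41]

theorem jump_down_iter (number : Int) (k : Nat) : ∀ (f : Nat) (count predict : Int),
    predict - number ≥ 41 * k + 9 →
    game_core_v1_loop (f + k) number count predict
      = game_core_v1_loop f number (count + k) (predict - 41 * k) := by
  induction k with
  | zero => intro f count predict _; simp
  | succ k ih =>
    intro f count predict h
    have h50 : predict - number ≥ 50 := by push_cast at h ⊢; omega
    have hf : f + (k + 1) = (f + k) + 1 := by omega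
    rw [hf, jump_down (f + k) number count predict h50,
      ih f (count + 1) (predict - 41) (by push_cast at h ⊢; omega)]
    congr 1 <;> push_cast <;> ring

-- after the far phase the measure is at most 9
theorem measure_small (number predict : Int) (h1 : number - predict < 50) (h2 : predict - number < 50) :
    pvMeasure number predict ≤ 9 := by
  have c := pvMeasure_cases number predict
  omega

-- ===== VERDICT (by name: the statement is the Claim_ definition above) =====
theorem game_core_v1_spec : Claim_equal_game_core_v1 := by
  unfold Claim_equal_game_core_v1
  intro number _
  unfold Spec_game_core_v1 game_core_v1 game_core_v1_alt
  by_cases h1 : number - 50 ≥ 50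
  · rw [if_pos h1]
    set k : Nat := ((number - 50) / 50).toNat with hk
    have hkc : (k : Int) = (number - 50) / 50 := by omega
    obtain ⟨m, hmeq, hm9⟩ : ∃ m : Nat, (number - 50).natAbs + 64 = m + k ∧ 9 ≤ m :=
      ⟨(number - 50).natAbs + 64 - k, by omega, by omega⟩
    rw [hmeq, jump_up_iter number k m 1 50 (by omega)]
    rw [loop_eq (pvMeasure number (50 + 50 * (k : Int))) m 64 number _ _ rfl
      (by exact (measure_small number (50 + 50 * (k : Int)) (by omega) (by omega)).trans hm9)
      (by exact (measure_small number (50 + 50 * (k : Int)) (by omega) (by omega)).trans (by norm_num))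
      (by omega) (by omega)]
    congr 1 <;> omega
  · rw [if_neg h1]
    by_cases h2 : 50 - number ≥ 50
    · rw [if_pos h2]
      set k : Nat := (((50 - number - 9) / 41)).toNat with hk
      have hkc : (k : Int) = (50 - number - 9) / 41 := by omega
      obtain ⟨m, hmeq, hm9⟩ : ∃ m : Nat, (number - 50).natAbs + 64 = m + k ∧ 9 ≤ m :=
        ⟨(number - 50).natAbs + 64 - k, by omega, by omega⟩
      rw [hmeq, jump_down_iter number k m 1 50 (by omega)]
      rw [loop_eq (pvMeasure number (50 - 41 * (k : Int))) m 64 number _ _ rfl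
        (by exact (measure_small number (50 - 41 * (k : Int)) (by omega) (by omega)).trans hm9)
        (by exact (measure_small number (50 - 41 * (k : Int)) (by omega) (by omega)).trans (by norm_num))
        (by omega) (by omega)]
      congr 1 <;> omega
    · rw [if_neg h2]
      exact loop_eq (pvMeasure number 50) _ 64 _ _ _ rfl
        (by have := measure_small number 50 (by omega) (by omega); omega)
        (by have := measure_small number 50 (by omega) (by omega); omega)
        (by omega) (by omega)
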